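-- pv_equiv track=rewrite | github.com/YukihiroOda/sin | functions.py | skip_even
-- ===== SOURCE A (Python) =====
-- def skip_even(xs):
--     b = False
--     for x in xs:
--         if b:
--             yield x
--             b = False
--         else:
--             b = True
-- ===== SOURCE B (Python) =====
-- def skip_even(xs):
--     yield from xs[1::2]
-- ===== Notes on version B (the rewrite author's own statement) =====
-- stated objective: simpler
-- what changed: Replaced the boolean-toggle streaming state machine with a closed-form extended slice xs[1::2] that selects the odd-index elements directly.
import Mathlib
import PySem

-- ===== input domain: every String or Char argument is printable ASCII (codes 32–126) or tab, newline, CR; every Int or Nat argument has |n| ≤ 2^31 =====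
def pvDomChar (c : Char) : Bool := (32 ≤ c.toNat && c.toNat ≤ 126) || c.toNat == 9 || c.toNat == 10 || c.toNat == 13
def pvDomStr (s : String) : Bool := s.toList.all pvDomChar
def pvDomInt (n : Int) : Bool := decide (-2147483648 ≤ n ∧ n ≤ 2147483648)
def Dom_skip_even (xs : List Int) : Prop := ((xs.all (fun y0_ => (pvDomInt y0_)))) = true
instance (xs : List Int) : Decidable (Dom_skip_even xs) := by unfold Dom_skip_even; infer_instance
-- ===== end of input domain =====

-- B replaces A's boolean-toggle single pass with the extended slice xs[1::2]; objective: simpler, same cost.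


-- ===== PORT A =====
-- A: a single pass with a boolean toggle b; yields x when b is true.
def skip_even (xs : List Int) : List Int :=
  (xs.foldl (fun (s : Bool × List Int) x =>
    if s.1 then (false, s.2 ++ [x]) else (true, s.2)) (false, [])).2

-- ===== PORT B =====
-- B: 'yield from xs[1::2]' — the extended slice with start 1, no stop, step 2.
def skip_even_alt (xs : List Int) : List Int :=
  (PySem.List.slice? xs (some 1) none 2).getD []

-- ===== PRECONDITION & SPEC =====
def Spec_skip_even (xs : List Int) (out : List Int) : Prop := out = skip_even_alt xs
instance (xs : List Int) (out : List Int) : Decidable (Spec_skip_even xs out) := by unfold Spec_skip_even; infer_instance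

-- ===== CLAIM (what is proved, stated in full; the proofs are below) =====
def Claim_equal_skip_even : Prop := ∀ (xs : List Int), Dom_skip_even xs → Spec_skip_even xs (skip_even xs)

-- ===== LEMMAS AND PROOFS =====
-- The odd-index elements of a list, taken two elements at a time (proof-side characterisation).
def oddIdx : List Int → List Int
  | [] => [] | [_] => [] | _ :: y :: r => y :: oddIdx r

-- A's fold accumulates exactly the odd-index elements.
theorem skip_even_foldl_eq (xs : List Int) : ∀ (acc : List Int),
    (xs.foldl (fun (s : Bool × List Int) x =>
      if s.1 then (false, s.2 ++ [x]) else (true, s.2)) (false, acc)).2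
      = acc ++ oddIdx xs := by
  induction xs using oddIdx.induct with
  | case1 => intro acc; simp [oddIdx]
  | case2 a => intro acc; simp [oddIdx]
  | case3 a y rest ih =>
      intro acc
      simp only [List.foldl, oddIdx]
      simpa using ih (acc ++ [y])

-- The slice xs[1::2] enumerates the odd-index elements.
theorem filterMap_range_odd (xs : List Int) :
    List.filterMap (fun (k : ℕ) => xs[(1 + 2*(k:ℤ)).toNat]?) (List.range (xs.length/2))
      = oddIdx xs := by
  induction xs using oddIdx.induct with
  | case1 => simp [oddIdx]
  | case2 a => simp [oddIdx]
  | case3 a y r ih =>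
      have hlen : (a :: y :: r).length / 2 = r.length / 2 + 1 := by
        simp [List.length]; omega
      rw [hlen, List.range_succ_eq_map, List.filterMap_cons, List.filterMap_map]
      have h0 : ((a :: y :: r))[(1 + 2*((0:ℕ):ℤ)).toNat]? = some y := by norm_num
      rw [h0]
      simp only [oddIdx, Function.comp]
      congr 1

theorem slice?_one_none_two (xs : List Int) :
    PySem.List.slice? xs (some 1) none 2 = some (oddIdx xs) := by
  simp only [PySem.List.slice?, PySem.List.sliceIndices]
  norm_num
  split_ifs with h
  · have hmin : min 1 (xs.length : ℤ) = 1 := by omega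
    rw [hmin]
    have hc : (((xs.length:ℤ) - 1 + 2 - 1) / 2).toNat = xs.length / 2 := by omega
    rw [hc]
    exact filterMap_range_odd xs
  · have hle : xs.length ≤ 1 := by omega
    match xs, hle with
    | [], _ => simp [oddIdx]
    | [a], _ => simp [oddIdx]

-- ===== VERDICT (by name: the statement is the Claim_ definition above) =====
theorem skip_even_spec : Claim_equal_skip_even := by
  intro xs _
  unfold Spec_skip_even skip_even skip_even_alt
  rw [slice?_one_none_two]
  simpa using skip_even_foldl_eq xs []
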